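-- pv_equiv track=rewrite | github.com/faisal-rasool/codility-java-practice | src/main/resources/FirstRound/solutions-hammad/4.py | solution
-- ===== SOURCE A (Python) =====
-- def solution(x: int) -> int:
--     x: str       = str(x)  # converting the number to it's string representation
--     x: list[str] = list(x) # converting the string to an array of characters
--
--     for i in range(0,len(x)):   # iterating on the array from the left side
--         if x[i] == '6':         # finding the first '6' (most significant 6)
--             x[i] = '9'          # changing it to '9'
--             break
--
--     x: str = ''.join(x)  # converting the array of characters to a string
--     x: int = int(x)      # converting the string to an integer
--
--     return x
-- ===== SOURCE B (Python) =====
-- def solution(x: int) -> int: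
--     # Arithmetic re-implementation: scan the digits of |x| right-to-left with
--     # % 10 // 10, remember the place of the most significant 6, and add
--     # 3 * 10**place to turn that 6 into a 9; no string conversion.
--     sign = -1 if x < 0 else 1
--     n = abs(x)
--     pos = -1
--     place = 0
--     while n > 0:
--         if n % 10 == 6:
--             pos = place
--         n //= 10
--         place += 1
--     m = abs(x)
--     if pos >= 0:
--         m += 3 * 10 ** pos
--     return sign * m
-- ===== Notes on version B (the rewrite author's own statement) =====
-- stated objective: alternative
-- what changed: B replaces A's string round-trip (str, char-list scan for the first '6', join, int) by pure arithmetic: it extracts the digits of |x| right-to-left with %10 and //10, records the place of the most significant 6, and adds 3*10**place before reapplying the sign.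
import Mathlib
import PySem

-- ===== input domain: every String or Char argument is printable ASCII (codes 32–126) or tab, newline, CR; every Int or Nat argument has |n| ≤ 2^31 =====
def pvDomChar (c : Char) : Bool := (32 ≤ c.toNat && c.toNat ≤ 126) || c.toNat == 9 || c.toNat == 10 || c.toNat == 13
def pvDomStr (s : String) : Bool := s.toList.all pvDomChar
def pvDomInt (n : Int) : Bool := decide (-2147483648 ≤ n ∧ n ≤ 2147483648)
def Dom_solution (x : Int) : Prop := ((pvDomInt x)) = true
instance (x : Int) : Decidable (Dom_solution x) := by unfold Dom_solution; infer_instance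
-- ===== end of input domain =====

-- B replaces A's string round-trip by digit arithmetic (%10, //10, + 3*10^place); return values proved equal for every Int x.

-- ===== PORT A =====
-- the for/break loop of A: scan left to right, change the first '6' to '9'
def replaceFirst6 : List Char → List Char
  | [] => []
  | c :: t => if c = '6' then '9' :: t else c :: replaceFirst6 t

-- ''.join + int(...): hand port of int() on the strings this program feeds it
-- (an optional '-' followed by ASCII digits, as produced by str(x) with one
-- digit replaced) — exact there; PySem's parser internals are private to PySemCore.
def digitsVal (cs : List Char) : Int := cs.foldl (fun a c => 10 * a + ((c.toNat : Int) - 48)) 0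

def pyIntOfDigits (cs : List Char) : Int :=
  match cs with
  | '-' :: ds => -(digitsVal ds)
  | ds => digitsVal ds

def solution (x : Int) : Int :=
  pyIntOfDigits (replaceFirst6 (PySem.Int.toChars x))

-- ===== PORT B =====
-- the while loop of B: strip digits of n right to left, remember the place of
-- the last (= most significant) 6 seen
def findPos6 (n : Nat) (p : Nat) (pos : Int) : Int :=
  if n = 0 then pos
  else findPos6 (n / 10) (p + 1) (if n % 10 = 6 then (p : Int) else pos)
decreasing_by exact Nat.div_lt_self (Nat.pos_of_ne_zero (by assumption)) (by omega)

def solution_alt (x : Int) : Int :=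
  let sign : Int := if x < 0 then -1 else 1
  let pos := findPos6 x.natAbs 0 (-1)
  let m : Int := (x.natAbs : Int) + (if 0 ≤ pos then 3 * 10 ^ pos.toNat else 0)
  sign * m

-- ===== PRECONDITION & SPEC =====
def Spec_solution (x : Int) (out : Int) : Prop := out = solution_alt x
instance (x : Int) (out : Int) : Decidable (Spec_solution x out) := by unfold Spec_solution; infer_instance

-- ===== CLAIM (what is proved, stated in full; the proofs are below) =====
def Claim_equal_solution : Prop := ∀ (x : Int), Dom_solution x → Spec_solution x (solution x)

-- ===== LEMMAS AND PROOFS =====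

-- big-endian decimal digits of n (the list Nat.toDigits 10 n produces)
def digitsBE (n : Nat) : List Char :=
  if n < 10 then [Nat.digitChar n]
  else digitsBE (n / 10) ++ [Nat.digitChar (n % 10)]
decreasing_by exact Nat.div_lt_self (by omega) (by omega)

-- place (distance from the last digit) of the leftmost '6', if any
def p6 : List Char → Option Nat
  | [] => none
  | c :: t => if c = '6' then some t.length else p6 t

theorem digitChar_toNat {r : Nat} (h : r < 10) : (Nat.digitChar r).toNat = 48 + r := by
  interval_cases r <;> decide

theorem toDigitsCore_eq (fuel : Nat) : ∀ n ds, n < fuel →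
    Nat.toDigitsCore 10 fuel n ds = digitsBE n ++ ds := by
  induction fuel with
  | zero => intro n ds h; omega
  | succ fuel ih =>
    intro n ds h
    rw [Nat.toDigitsCore]
    by_cases h10 : n < 10
    · have hdiv : n / 10 = 0 := Nat.div_eq_of_lt h10
      rw [digitsBE]
      simp [hdiv, h10, Nat.mod_eq_of_lt h10]
    · have hdiv : ¬ (n / 10 = 0) := by omega
      have hlt : n / 10 < fuel := by
        have := Nat.div_lt_self (by omega : 0 < n) (by omega : 1 < 10)
        omega
      rw [digitsBE]
      simp only [hdiv, h10, ite_false]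
      rw [ih (n / 10) _ hlt]
      simp

theorem toChars_eq (x : Int) :
    PySem.Int.toChars x = if x < 0 then '-' :: digitsBE x.natAbs else digitsBE x.toNat := by
  unfold PySem.Int.toChars Nat.toDigits
  split <;> rw [toDigitsCore_eq _ _ _ (by omega)] <;> simp

theorem digitChar_eq_six_iff {r : Nat} (h : r < 10) : (Nat.digitChar r = '6') ↔ r = 6 := by
  interval_cases r <;> simp [Nat.digitChar]

theorem digitsVal_append_singleton (ds : List Char) (c : Char) :
    digitsVal (ds ++ [c]) = 10 * digitsVal ds + ((c.toNat : Int) - 48) := by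
  simp [digitsVal, List.foldl_append]

theorem digitsVal_digitsBE (n : Nat) : digitsVal (digitsBE n) = (n : Int) := by
  fun_induction digitsBE with
  | case1 n h =>
    simp [digitsVal]
    have := digitChar_toNat h
    omega
  | case2 n h ih =>
    rw [digitsVal_append_singleton, ih]
    have := digitChar_toNat (Nat.mod_lt n (by omega) : n % 10 < 10)
    have h2 : 10 * (n / 10) + n % 10 = n := Nat.div_add_mod n 10
    push_cast
    omega

theorem length_replaceFirst6 (ds : List Char) : (replaceFirst6 ds).length = ds.length := by
  induction ds with
  | nil => rfl
  | cons c t ih => rw [replaceFirst6]; split <;> simp [ih]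

theorem digitsVal_shift (t : List Char) : ∀ a : Int,
    t.foldl (fun a c => 10 * a + ((c.toNat : Int) - 48)) a
      = a * 10 ^ t.length + t.foldl (fun a c => 10 * a + ((c.toNat : Int) - 48)) 0 := by
  induction t with
  | nil => intro a; simp
  | cons c t ih =>
    intro a
    simp only [List.foldl_cons, List.length_cons]
    rw [ih (10 * a + ((c.toNat : Int) - 48)), ih (10 * 0 + ((c.toNat : Int) - 48))]
    ring

theorem digitsVal_cons (c : Char) (t : List Char) :
    digitsVal (c :: t) = ((c.toNat : Int) - 48) * 10 ^ t.length + digitsVal t := by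
  unfold digitsVal
  simp only [List.foldl_cons]
  rw [digitsVal_shift]
  ring

theorem digitsVal_replaceFirst6 (ds : List Char) :
    digitsVal (replaceFirst6 ds) =
      digitsVal ds + (match p6 ds with | some k => 3 * 10 ^ k | none => 0) := by
  induction ds with
  | nil => simp [replaceFirst6, p6, digitsVal]
  | cons c t ih =>
    rw [replaceFirst6]
    by_cases hc : c = '6'
    · subst hc
      rw [if_pos rfl, digitsVal_cons, digitsVal_cons]
      simp only [p6, reduceIte]
      have h9 : (('9'.toNat : Int)) = 57 := by decide
      have h6 : (('6'.toNat : Int)) = 54 := by decide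
      rw [h9, h6]
      ring
    · rw [if_neg hc, digitsVal_cons, digitsVal_cons, length_replaceFirst6, ih]
      simp only [p6, if_neg hc]
      ring

theorem p6_append_singleton (ds : List Char) (c : Char) :
    p6 (ds ++ [c]) = (match p6 ds with
      | some k => some (k + 1)
      | none => if c = '6' then some 0 else none) := by
  induction ds with
  | nil => simp [p6]
  | cons d t ih =>
    simp only [List.cons_append, p6]
    by_cases hd : d = '6'
    · simp [hd]
    · simp only [hd, ite_false, ih]

theorem findPos6_eq (n : Nat) (hn : 0 < n) : ∀ (p : Nat) (pos : Int),
    findPos6 n p pos = (match p6 (digitsBE n) with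
      | some k => ((p + k : Nat) : Int)
      | none => pos) := by
  induction n using Nat.strong_induction_on with
  | _ n ih =>
    intro p pos
    rw [findPos6, if_neg (by omega : ¬ n = 0)]
    by_cases h10 : n < 10
    · have hdiv : n / 10 = 0 := Nat.div_eq_of_lt h10
      have hmod : n % 10 = n := Nat.mod_eq_of_lt h10
      rw [hdiv, findPos6, if_pos rfl, digitsBE, if_pos h10]
      simp only [p6, List.length_nil, hmod]
      by_cases h6 : n = 6
      · subst h6; simp [Nat.digitChar]
      · rw [if_neg h6, if_neg (by rw [digitChar_eq_six_iff h10]; exact h6)]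
    · have hpos' : 0 < n / 10 := by omega
      have hlt : n / 10 < n := Nat.div_lt_self (by omega) (by omega)
      rw [digitsBE, if_neg h10, p6_append_singleton, ih (n / 10) hlt hpos' (p + 1)]
      have hmod : n % 10 < 10 := Nat.mod_lt n (by omega)
      rcases hp : p6 (digitsBE (n / 10)) with _ | k
      · by_cases h6 : n % 10 = 6
        · rw [if_pos h6, if_pos ((digitChar_eq_six_iff hmod).mpr h6)]
          simp
        · rw [if_neg h6, if_neg (by rw [digitChar_eq_six_iff hmod]; exact h6)]
      · push_cast
        ring

theorem digitChar_ne_dash {r : Nat} (h : r < 10) : Nat.digitChar r ≠ '-' := by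
  interval_cases r <;> decide

theorem digitsBE_ne_nil (n : Nat) : digitsBE n ≠ [] := by
  fun_induction digitsBE <;> simp

theorem not_dash_digitsBE (n : Nat) : ∀ c ∈ digitsBE n, c ≠ '-' := by
  fun_induction digitsBE with
  | case1 n h =>
    intro c hc
    simp only [List.mem_singleton] at hc
    subst hc
    exact digitChar_ne_dash h
  | case2 n h ih =>
    intro c hc
    rcases List.mem_append.mp hc with hc | hc
    · exact ih c hc
    · simp only [List.mem_singleton] at hc
      subst hc
      exact digitChar_ne_dash (Nat.mod_lt n (by omega))

theorem pyIntOfDigits_dash (ds : List Char) : pyIntOfDigits ('-' :: ds) = -(digitsVal ds) := rfl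

theorem pyIntOfDigits_ne_dash {c : Char} (t : List Char) (h : c ≠ '-') :
    pyIntOfDigits (c :: t) = digitsVal (c :: t) := by
  unfold pyIntOfDigits
  split
  · next ds heq =>
    simp only [List.cons.injEq] at heq
    exact absurd heq.1 h
  · rfl

theorem pyIntOfDigits_replaceFirst6_digitsBE (m : Nat) :
    pyIntOfDigits (replaceFirst6 (digitsBE m)) =
      (m : Int) + (match p6 (digitsBE m) with | some k => 3 * 10 ^ k | none => 0) := by
  have hval : digitsVal (replaceFirst6 (digitsBE m)) =
      (m : Int) + (match p6 (digitsBE m) with | some k => 3 * 10 ^ k | none => 0) := by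
    rw [digitsVal_replaceFirst6, digitsVal_digitsBE]
  obtain ⟨c, t, hct⟩ : ∃ c t, digitsBE m = c :: t := by
    rcases hds : digitsBE m with _ | ⟨c, t⟩
    · exact absurd hds (digitsBE_ne_nil m)
    · exact ⟨c, t, rfl⟩
  have hc : c ≠ '-' := not_dash_digitsBE m c (by rw [hct]; exact List.mem_cons_self ..)
  rw [hct] at hval ⊢
  rw [replaceFirst6] at hval ⊢
  by_cases h6 : c = '6'
  · rw [if_pos h6] at hval ⊢
    rw [pyIntOfDigits_ne_dash t (by decide)]
    exact hval
  · rw [if_neg h6] at hval ⊢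
    rw [pyIntOfDigits_ne_dash _ hc]
    exact hval

theorem alt_magnitude (m : Nat) (hm : 0 < m) :
    (m : Int) + (if 0 ≤ findPos6 m 0 (-1) then 3 * 10 ^ (findPos6 m 0 (-1)).toNat else 0) =
      (m : Int) + (match p6 (digitsBE m) with | some k => 3 * 10 ^ k | none => 0) := by
  rw [findPos6_eq m hm 0 (-1)]
  rcases p6 (digitsBE m) with _ | k
  · norm_num
  · simp

-- ===== VERDICT (by name: the statement is the Claim_ definition above) =====
theorem solution_spec : Claim_equal_solution := by
  intro x _
  unfold Spec_solution solution solution_alt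
  rcases lt_trichotomy x 0 with hx | hx | hx
  · have hm : 0 < x.natAbs := by omega
    rw [toChars_eq, if_pos hx, replaceFirst6, if_neg (by decide), pyIntOfDigits_dash,
      digitsVal_replaceFirst6, digitsVal_digitsBE]
    simp only [hx, if_pos]
    rw [← alt_magnitude x.natAbs hm]
    ring
  · subst hx
    have hf : findPos6 (Int.natAbs 0) 0 (-1) = -1 := by rw [findPos6]; simp
    have hd : digitsBE (Int.toNat 0) = ['0'] := by rw [digitsBE]; norm_num [Nat.digitChar]
    rw [toChars_eq, if_neg (by omega), hd, hf]
    decide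
  · have hm : 0 < x.natAbs := by omega
    have htoNat : x.toNat = x.natAbs := by omega
    rw [toChars_eq, if_neg (by omega), htoNat, pyIntOfDigits_replaceFirst6_digitsBE]
    simp only [if_neg (by omega : ¬ x < 0)]
    rw [← alt_magnitude x.natAbs hm]
    ring
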